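-- pv_equiv track=rewrite | github.com/joonable/leet_code | codility/count_bounded_slices.py | solution
-- ===== SOURCE A (Python) =====
-- from collections import deque
--
-- def solution(K, A):
--     # Implement your solution here
--     min_queue, max_queue = deque(), deque()
--
--     n = len(A)
--     l = 0
--     result = 0
--     for r in range(n):
--         x = A[r]
--         while min_queue and A[min_queue[-1]] > x:
--             min_queue.pop()
--         min_queue.append(r)
--
--         while max_queue and A[max_queue[-1]] < x:
--             max_queue.pop()
--         max_queue.append(r)
--
--         while A[max_queue[0]] - A[min_queue[0]] > K:
--             if min_queue[0] == l:
--                 min_queue.popleft()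
--             if max_queue[0] == l:
--                 max_queue.popleft()
--             l += 1
--
--         result += r - l + 1
--         if result > 1_000_000_000:
--             return 1_000_000_000
--
--     return result
-- ===== SOURCE B (Python) =====
-- def solution(K, A):
--     # For each right endpoint r, scan leftwards keeping running max/min and
--     # count valid left endpoints until the window first breaks (validity is
--     # monotone in the left endpoint); cap the total at 1_000_000_000.
--     total = 0
--     for r in range(len(A)):
--         mx = mn = A[r]
--         for l in range(r, -1, -1):
--             v = A[l]
--             if v > mx:
--                 mx = v
--             if v < mn:
--                 mn = v
--             if mx - mn <= K:
--                 total += 1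
--             else:
--                 break
--     return min(total, 1_000_000_000)
-- ===== Notes on version B (the rewrite author's own statement) =====
-- stated objective: alternative
-- what changed: Replaces the amortized monotonic-deque sliding window (two index deques plus a moving left pointer) by a per-right-endpoint backward scan that keeps running max/min and stops at the first invalid left endpoint, applying the 1_000_000_000 cap once at the end with min instead of an early return.
import Mathlib
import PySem

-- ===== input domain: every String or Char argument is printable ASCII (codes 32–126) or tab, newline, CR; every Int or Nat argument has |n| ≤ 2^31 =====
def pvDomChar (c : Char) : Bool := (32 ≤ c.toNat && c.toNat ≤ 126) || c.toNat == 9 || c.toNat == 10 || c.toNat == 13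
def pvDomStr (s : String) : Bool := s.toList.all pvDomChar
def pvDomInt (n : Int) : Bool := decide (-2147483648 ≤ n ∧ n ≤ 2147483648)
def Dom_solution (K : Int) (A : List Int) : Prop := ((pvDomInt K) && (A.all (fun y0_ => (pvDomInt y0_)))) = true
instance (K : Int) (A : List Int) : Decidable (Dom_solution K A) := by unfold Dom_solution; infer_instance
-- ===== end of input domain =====

-- B replaces A's monotonic-deque sliding window by a per-right-endpoint backward scan
-- with running max/min (cap applied once at the end); equal return values proved on Pre_.

-- ===== PORT A =====

-- 'while q and A[q[-1]] > x: q.pop()' : popping from the right, done on the reversed list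
def pvPopBackRev (b : Nat → Bool) : List Nat → List Nat
  | [] => []
  | i :: rest => if b i then pvPopBackRev b rest else i :: rest

def pvPopBack (b : Nat → Bool) (q : List Nat) : List Nat :=
  (pvPopBackRev b q.reverse).reverse

-- the inner 'while A[max_queue[0]] - A[min_queue[0]] > K' loop; 'none' models the
-- IndexError Python raises on an empty deque; fuel only makes the recursion total
-- (under Pre_ it is never exhausted)
def pvShrink (A : List Int) (K : Int) : Nat → List Nat → List Nat → Nat → Option (List Nat × List Nat × Nat)
  | 0, _, _, _ => none
  | fuel + 1, minq, maxq, l =>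
    match maxq.head?, minq.head? with
    | some mx, some mn =>
      if A.getD mx 0 - A.getD mn 0 > K then
        pvShrink A K fuel (if mn = l then minq.tail else minq)
          (if mx = l then maxq.tail else maxq) (l + 1)
      else some (minq, maxq, l)
    | _, _ => none

-- the 'for r in range(n)' loop with state (min_queue, max_queue, l, result)
def pvOuter (K : Int) (A : List Int) : List Nat → List Nat → List Nat → Nat → Int → Option Int
  | [], _, _, _, result => some result
  | r :: rs, minq, maxq, l, result =>
    let x := A.getD r 0
    let minq' := pvPopBack (fun i => A.getD i 0 > x) minq ++ [r]
    let maxq' := pvPopBack (fun i => A.getD i 0 < x) maxq ++ [r]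
    match pvShrink A K (A.length + 2) minq' maxq' l with
    | none => none
    | some (minq'', maxq'', l') =>
      let result' := result + ((r : Int) - (l' : Int) + 1)
      if result' > 1000000000 then some 1000000000
      else pvOuter K A rs minq'' maxq'' l' result'

def solution (K : Int) (A : List Int) : Int :=
  -- '.getD 0' is only for totality: under Pre_solution pvOuter never returns none
  (pvOuter K A (List.range A.length) [] [] 0 0).getD 0

-- ===== PORT B =====

-- 'for l in range(r, -1, -1)' with running mx/mn and break
def pvInner (K : Int) (A : List Int) : Nat → Int → Int → Int → Int
  | l, mx, mn, total =>
    let v := A.getD l 0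
    let mx' := if v > mx then v else mx
    let mn' := if v < mn then v else mn
    if mx' - mn' ≤ K then
      match l with
      | 0 => total + 1
      | Nat.succ l' => pvInner K A l' mx' mn' (total + 1)
    else total

def solution_alt (K : Int) (A : List Int) : Int :=
  let total := (List.range A.length).foldl
    (fun total r => pvInner K A r (A.getD r 0) (A.getD r 0) total) 0
  min total 1000000000

-- ===== PRECONDITION & SPEC =====
-- Pre_ excludes exactly the inputs on which A raises IndexError: K < 0 with nonempty A
-- (the shrink loop then drains both deques and indexes an empty one).
def Pre_solution (K : Int) (A : List Int) : Prop := 0 ≤ K ∨ A = []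
instance (K : Int) (A : List Int) : Decidable (Pre_solution K A) := by
  unfold Pre_solution; infer_instance

def pvWitness_solution : Int × List Int := (2, [3, 5, 7, 6, 3])

def Spec_solution (K : Int) (A : List Int) (out : Int) : Prop := out = solution_alt K A
instance (K : Int) (A : List Int) (out : Int) : Decidable (Spec_solution K A out) := by
  unfold Spec_solution; infer_instance

-- ===== CLAIM (what is proved, stated in full; the proofs are below) =====
def Claim_equal_solution : Prop :=
  ∀ (K : Int) (A : List Int), Dom_solution K A → Pre_solution K A →
    Spec_solution K A (solution K A)

-- ===== LEMMAS AND PROOFS =====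

-- range minimum / maximum of a over [l..r]
def rmin (a : Nat → Int) (l r : Nat) : Int :=
  if h : l < r then min (a l) (rmin a (l + 1) r) else a r
termination_by r - l
decreasing_by omega

def rmax (a : Nat → Int) (l r : Nat) : Int :=
  if h : l < r then max (a l) (rmax a (l + 1) r) else a r
termination_by r - l
decreasing_by omega

theorem rmin_of_lt (a : Nat → Int) {l r : Nat} (h : l < r) :
    rmin a l r = min (a l) (rmin a (l + 1) r) := by rw [rmin]; simp [h]

theorem rmin_self (a : Nat → Int) (r : Nat) : rmin a r r = a r := by rw [rmin]; simp

theorem rmax_of_lt (a : Nat → Int) {l r : Nat} (h : l < r) :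
    rmax a l r = max (a l) (rmax a (l + 1) r) := by rw [rmax]; simp [h]

theorem rmax_self (a : Nat → Int) (r : Nat) : rmax a r r = a r := by rw [rmax]; simp

theorem rmin_le (a : Nat → Int) {l r j : Nat} (h1 : l ≤ j) (h2 : j ≤ r) :
    rmin a l r ≤ a j := by
  have H : ∀ d l, r - l ≤ d → l ≤ j → rmin a l r ≤ a j := by
    intro d
    induction d with
    | zero =>
      intro l hd hl
      have hlr : l = r := by omega
      have hjr : j = r := by omega
      subst hlr; subst hjr; rw [rmin_self]
    | succ d ih =>
      intro l hd hl
      by_cases hlr : l < r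
      · rw [rmin_of_lt a hlr]
        rcases eq_or_lt_of_le hl with h | h
        · subst h; exact min_le_left _ _
        · exact le_trans (min_le_right _ _) (ih (l + 1) (by omega) (by omega))
      · have hlr' : l = r := by omega
        have hjr : j = r := by omega
        subst hlr'; subst hjr; rw [rmin_self]
  exact H (r - l) l le_rfl h1

theorem le_rmax (a : Nat → Int) {l r j : Nat} (h1 : l ≤ j) (h2 : j ≤ r) :
    a j ≤ rmax a l r := by
  have H : ∀ d l, r - l ≤ d → l ≤ j → a j ≤ rmax a l r := by
    intro d
    induction d with
    | zero =>
      intro l hd hl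
      have hlr : l = r := by omega
      have hjr : j = r := by omega
      subst hlr; subst hjr; rw [rmax_self]
    | succ d ih =>
      intro l hd hl
      by_cases hlr : l < r
      · rw [rmax_of_lt a hlr]
        rcases eq_or_lt_of_le hl with h | h
        · subst h; exact le_max_left _ _
        · exact le_trans (ih (l + 1) (by omega) (by omega)) (le_max_right _ _)
      · have hlr' : l = r := by omega
        have hjr : j = r := by omega
        subst hlr'; subst hjr; rw [rmax_self]
  exact H (r - l) l le_rfl h1

theorem rmin_attained (a : Nat → Int) {l r : Nat} (h : l ≤ r) :
    ∃ j, l ≤ j ∧ j ≤ r ∧ rmin a l r = a j := by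
  have H : ∀ d l, r - l ≤ d → l ≤ r → ∃ j, l ≤ j ∧ j ≤ r ∧ rmin a l r = a j := by
    intro d
    induction d with
    | zero =>
      intro l hd hl
      have hlr : l = r := by omega
      exact ⟨r, by omega, le_rfl, by rw [hlr, rmin_self]⟩
    | succ d ih =>
      intro l hd hl
      by_cases hlr : l < r
      · rw [rmin_of_lt a hlr]
        rcases le_total (a l) (rmin a (l + 1) r) with hc | hc
        · exact ⟨l, le_rfl, by omega, by rw [min_eq_left hc]⟩
        · obtain ⟨j, hj1, hj2, hj3⟩ := ih (l + 1) (by omega) (by omega)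
          exact ⟨j, by omega, hj2, by rw [min_eq_right hc, hj3]⟩
      · have hlr' : l = r := by omega
        exact ⟨r, by omega, le_rfl, by rw [hlr', rmin_self]⟩
  exact H (r - l) l le_rfl h

theorem rmax_attained (a : Nat → Int) {l r : Nat} (h : l ≤ r) :
    ∃ j, l ≤ j ∧ j ≤ r ∧ rmax a l r = a j := by
  have H : ∀ d l, r - l ≤ d → l ≤ r → ∃ j, l ≤ j ∧ j ≤ r ∧ rmax a l r = a j := by
    intro d
    induction d with
    | zero =>
      intro l hd hl
      have hlr : l = r := by omega
      exact ⟨r, by omega, le_rfl, by rw [hlr, rmax_self]⟩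
    | succ d ih =>
      intro l hd hl
      by_cases hlr : l < r
      · rw [rmax_of_lt a hlr]
        rcases le_total (a l) (rmax a (l + 1) r) with hc | hc
        · obtain ⟨j, hj1, hj2, hj3⟩ := ih (l + 1) (by omega) (by omega)
          exact ⟨j, by omega, hj2, by rw [max_eq_right hc, hj3]⟩
        · exact ⟨l, le_rfl, by omega, by rw [max_eq_left hc]⟩
      · have hlr' : l = r := by omega
        exact ⟨r, by omega, le_rfl, by rw [hlr', rmax_self]⟩
  exact H (r - l) l le_rfl h

theorem rmax_eq_neg_rmin (a : Nat → Int) (l r : Nat) :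
    rmax a l r = - rmin (fun i => -(a i)) l r := by
  have H : ∀ d l, r - l ≤ d → rmax a l r = - rmin (fun i => -(a i)) l r := by
    intro d
    induction d with
    | zero =>
      intro l hd
      have hlr : ¬ l < r := by omega
      rw [rmax, rmin]; simp [hlr]
    | succ d ih =>
      intro l hd
      by_cases hlr : l < r
      · rw [rmax_of_lt a hlr, rmin_of_lt _ hlr, ih (l + 1) (by omega)]
        rw [neg_inf, neg_neg]
      · rw [rmax, rmin]; simp [hlr]
  exact H (r - l) l le_rfl

theorem rmax_sub (a : Nat → Int) {l' l r' r : Nat} (h1 : l' ≤ l) (h2 : r' ≤ r)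
    (h3 : l ≤ r') : rmax a l r' ≤ rmax a l' r := by
  obtain ⟨j, hj1, hj2, hj3⟩ := rmax_attained a h3
  rw [hj3]
  exact le_rmax a (by omega) (by omega)

theorem rmin_sub (a : Nat → Int) {l' l r' r : Nat} (h1 : l' ≤ l) (h2 : r' ≤ r)
    (h3 : l ≤ r') : rmin a l' r ≤ rmin a l r' := by
  obtain ⟨j, hj1, hj2, hj3⟩ := rmin_attained a h3
  rw [hj3]
  exact rmin_le a (by omega) (by omega)

-- the suffix-extremal-index predicate and the deque contents
def pb (a : Nat → Int) (r i : Nat) : Bool :=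
  decide (∀ j ∈ List.range' (i + 1) (r - i), a i ≤ a j)

def Q (a : Nat → Int) (l r : Nat) : List Nat :=
  (List.range' l (r + 1 - l)).filter (pb a r)

theorem mem_Q (a : Nat → Int) {l r i : Nat} :
    i ∈ Q a l r ↔ (l ≤ i ∧ i ≤ r ∧ ∀ j, i < j → j ≤ r → a i ≤ a j) := by
  simp only [Q, List.mem_filter, List.mem_range'_1, pb, decide_eq_true_eq]
  constructor
  · rintro ⟨⟨h1, h2⟩, h3⟩
    refine ⟨h1, by omega, ?_⟩
    intro j hj1 hj2
    exact h3 j (by omega)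
  · rintro ⟨h1, h2, h3⟩
    refine ⟨⟨h1, by omega⟩, ?_⟩
    intro j hj
    exact h3 j (by omega) (by omega)

theorem self_mem_Q (a : Nat → Int) {l r : Nat} (h : l ≤ r) : r ∈ Q a l r := by
  rw [mem_Q]
  exact ⟨h, le_rfl, fun j hj1 hj2 => absurd hj1 (by omega)⟩

theorem Q_pairwise (a : Nat → Int) (l r : Nat) : (Q a l r).Pairwise (· < ·) := by
  exact List.Pairwise.sublist List.filter_sublist
    (List.pairwise_lt_range' 1 (by norm_num))

theorem Q_pairwise_le (a : Nat → Int) (l r : Nat) :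
    (Q a l r).Pairwise (fun i j => a i ≤ a j) := by
  refine List.Pairwise.imp_of_mem ?_ (Q_pairwise a l r)
  intro i j hi hj hlt
  obtain ⟨_, _, hp⟩ := (mem_Q a).mp hi
  obtain ⟨_, hjr, _⟩ := (mem_Q a).mp hj
  exact hp j hlt hjr

theorem head_Q (a : Nat → Int) {l r h : Nat} {t : List Nat} (hlr : l ≤ r)
    (hQ : Q a l r = h :: t) : l ≤ h ∧ h ≤ r ∧ a h = rmin a l r := by
  have hmem : h ∈ Q a l r := by rw [hQ]; exact List.mem_cons_self
  obtain ⟨hl, hr', hp⟩ := (mem_Q a).mp hmem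
  refine ⟨hl, hr', ?_⟩
  have hlt : ∀ x ∈ t, h < x := fun x hx =>
    List.rel_of_pairwise_cons (hQ ▸ Q_pairwise a l r) hx
  have key : ∀ d j, l ≤ j → j ≤ r → r - j ≤ d → a h ≤ a j := by
    intro d
    induction d with
    | zero =>
      intro j h1 h2 h3
      rcases lt_trichotomy h j with hc | hc | hc
      · exact hp j hc h2
      · rw [hc]
      · omega
    | succ d ih =>
      intro j h1 h2 h3
      rcases lt_trichotomy h j with hc | hc | hc
      · exact hp j hc h2
      · rw [hc]
      · -- j < h, so j ∉ Q, so the suffix-min property fails at j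
        have hnot : j ∉ Q a l r := by
          rw [hQ]
          intro hmem'
          rcases List.mem_cons.mp hmem' with hjh | hmem''
          · omega
          · exact absurd (hlt j hmem'') (by omega)
        rw [mem_Q] at hnot
        push Not at hnot
        obtain ⟨j', hj'1, hj'2, hj'3⟩ := hnot h1 h2
        have hah : a h ≤ a j' := ih j' (by omega) hj'2 (by omega)
        omega
  obtain ⟨j0, hj0l, hj0r, hj0⟩ := rmin_attained a hlr
  have hle : rmin a l r ≤ a h := rmin_le a hl hr'
  have hge : a h ≤ a j0 := key r j0 hj0l hj0r (by omega)
  omega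

theorem pvPopBack_eq_filter (a : Nat → Int) (b : Nat → Bool) {q : List Nat}
    (hq : q.Pairwise (fun i j => a i ≤ a j))
    (x : Int) (hb : ∀ i, b i = true ↔ x < a i) :
    pvPopBack b q = q.filter (fun i => !(b i)) := by
  have rev : ∀ s : List Nat, s.Pairwise (fun i j => a j ≤ a i) →
      pvPopBackRev b s = s.filter (fun i => !(b i)) := by
    intro s hs
    induction s with
    | nil => rfl
    | cons i rest ih =>
      rw [List.pairwise_cons] at hs
      by_cases hbi : b i = true
      · simp only [pvPopBackRev, hbi, if_true, List.filter_cons, Bool.not_true,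
          Bool.false_eq_true, if_false]
        exact ih hs.2
      · have hxi : a i ≤ x := by
          by_contra hx
          exact hbi ((hb i).mpr (by omega))
        have hbi' : b i = false := by
          cases hbool : b i
          · rfl
          · exact absurd hbool hbi
        simp only [pvPopBackRev, hbi', Bool.false_eq_true, if_false, List.filter_cons,
          Bool.not_false, if_true]
        congr 1
        rw [eq_comm, List.filter_eq_self]
        intro j hj
        have haj : a j ≤ a i := hs.1 j hj
        have hbj : b j = false := by
          cases hbool : b j
          · rfl
          · have := (hb j).mp hbool
            omega
        rw [hbj]
        rfl
  have hpair : q.reverse.Pairwise (fun i j => a j ≤ a i) :=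
    List.pairwise_reverse.mpr hq
  unfold pvPopBack
  rw [rev q.reverse hpair, List.filter_reverse, List.reverse_reverse]

theorem Q_push (a : Nat → Int) (b : Nat → Bool) {l r : Nat} (hlr : l ≤ r)
    (hb : ∀ i, b i = true ↔ a (r + 1) < a i) :
    pvPopBack b (Q a l r) ++ [r + 1] = Q a l (r + 1) := by
  have hnb : ∀ i, (!(b i)) = decide (a i ≤ a (r + 1)) := by
    intro i
    cases hbool : b i
    · have hx : ¬ a (r + 1) < a i := fun hx =>
        absurd ((hb i).mpr hx) (by simp [hbool])
      simp only [Bool.not_false]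
      exact (decide_eq_true (by omega)).symm
    · have hx := (hb i).mp hbool
      simp only [Bool.not_true]
      exact (decide_eq_false (by omega)).symm
  have hcat : List.range' l (r + 1 + 1 - l) = List.range' l (r + 1 - l) ++ [r + 1] := by
    have h1 : r + 1 + 1 - l = (r + 1 - l) + 1 := by omega
    have h2 : l + (r + 1 - l) = r + 1 := by omega
    rw [h1, List.range'_1_concat, h2]
  have hsplit : Q a l (r + 1) = (List.range' l (r + 1 - l)).filter (pb a (r + 1)) ++ [r + 1] := by
    rw [Q, hcat, List.filter_append]
    congr 1
    simp [pb]
  have hcongr : (List.range' l (r + 1 - l)).filter (pb a (r + 1)) =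
      (List.range' l (r + 1 - l)).filter (fun i => pb a r i && (!(b i))) := by
    apply List.filter_congr
    intro i hi
    rw [List.mem_range'_1] at hi
    rw [hnb i]
    have hsplit2 : List.range' (i + 1) (r + 1 - i) = List.range' (i + 1) (r - i) ++ [r + 1] := by
      have h1 : r + 1 - i = (r - i) + 1 := by omega
      have h2 : i + 1 + (r - i) = r + 1 := by omega
      rw [h1, List.range'_1_concat, h2]
    simp only [pb, ← Bool.decide_and]
    apply decide_eq_decide.mpr
    rw [hsplit2]
    simp only [List.forall_mem_append, List.forall_mem_singleton]
  rw [pvPopBack_eq_filter a b (Q_pairwise_le a l r) (a (r + 1)) hb]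
  rw [hsplit, hcongr, Q, List.filter_filter]
  congr 1
  apply List.filter_congr
  intro i _
  rw [Bool.and_comm]

theorem Q_step (a : Nat → Int) {l r : Nat} (hlr : l ≤ r) :
    Q a l r = (if pb a r l = true then [l] else []) ++ Q a (l + 1) r := by
  have hr1 : r + 1 - l = (r - l) + 1 := by omega
  rw [Q, hr1, List.range'_succ, List.filter_cons]
  by_cases hpb : pb a r l = true
  · simp only [hpb, if_true]
    rw [Q]
    have : r + 1 - (l + 1) = r - l := by omega
    rw [this]
    rfl
  · simp only [hpb]
    rw [Q]
    have : r + 1 - (l + 1) = r - l := by omega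
    rw [this]
    rfl

theorem Q_tail (a : Nat → Int) {l r h : Nat} {t : List Nat} (hlr : l ≤ r)
    (hQ : Q a l r = h :: t) : (if h = l then t else h :: t) = Q a (l + 1) r := by
  rw [Q_step a hlr] at hQ
  by_cases hpb : pb a r l = true
  · rw [hpb] at hQ
    simp only [if_true, List.singleton_append, List.cons.injEq] at hQ
    rw [if_pos hQ.1.symm]
    exact hQ.2.symm
  · rw [if_neg hpb] at hQ
    simp only [List.nil_append] at hQ
    have hmem : h ∈ Q a (l + 1) r := by rw [hQ]; exact List.mem_cons_self
    have hge : l + 1 ≤ h := ((mem_Q a).mp hmem).1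
    rw [if_neg (by omega)]
    exact hQ.symm

-- the least valid left endpoint for right endpoint r
def ai (A : List Int) : Nat → Int := fun i => A.getD i 0

theorem ai_apply (A : List Int) (i : Nat) : ai A i = A.getD i 0 := rfl

def fIdx (K : Int) (A : List Int) (r : Nat) : Nat :=
  Nat.find (p := fun l => r ≤ l ∨ rmax (ai A) l r - rmin (ai A) l r ≤ K) ⟨r, Or.inl le_rfl⟩

theorem fIdx_le (K : Int) (A : List Int) (r : Nat) : fIdx K A r ≤ r := by
  exact Nat.find_le (Or.inl le_rfl)

theorem vld_of_le (K : Int) (A : List Int) (hK : 0 ≤ K) {l r : Nat}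
    (h1 : fIdx K A r ≤ l) (h2 : l ≤ r) :
    rmax (ai A) l r - rmin (ai A) l r ≤ K := by
  rcases Nat.find_spec (p := fun l => r ≤ l ∨ rmax (ai A) l r - rmin (ai A) l r ≤ K)
      ⟨r, Or.inl le_rfl⟩ with hs | hs
  · have h3 : fIdx K A r = r := by
      have := fIdx_le K A r
      unfold fIdx at this ⊢
      omega
    have h4 : l = r := by
      rw [h3] at h1
      omega
    subst h4
    rw [rmax_self, rmin_self]
    omega
  · have ha : rmax (ai A) l r ≤ rmax (ai A) (fIdx K A r) r := rmax_sub (ai A) h1 le_rfl h2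
    have hb : rmin (ai A) (fIdx K A r) r ≤ rmin (ai A) l r := rmin_sub (ai A) h1 le_rfl h2
    unfold fIdx at ha hb
    omega

theorem not_vld_of_lt (K : Int) (A : List Int) {l r : Nat} (h : l < fIdx K A r) :
    ¬ (rmax (ai A) l r - rmin (ai A) l r ≤ K) ∧ l < r := by
  have hmin := Nat.find_min (p := fun l => r ≤ l ∨ rmax (ai A) l r - rmin (ai A) l r ≤ K)
      ⟨r, Or.inl le_rfl⟩ (m := l) h
  push Not at hmin
  exact ⟨by omega, hmin.1⟩

theorem fIdx_mono (K : Int) (A : List Int) (r : Nat) : fIdx K A r ≤ fIdx K A (r + 1) := by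
  apply Nat.find_le
  rcases Nat.find_spec (p := fun l => r + 1 ≤ l ∨ rmax (ai A) l (r + 1) - rmin (ai A) l (r + 1) ≤ K)
      ⟨r + 1, Or.inl le_rfl⟩ with hs | hs
  · left
    have : fIdx K A (r + 1) = Nat.find (p := fun l => r + 1 ≤ l ∨ rmax (ai A) l (r + 1) - rmin (ai A) l (r + 1) ≤ K) ⟨r + 1, Or.inl le_rfl⟩ := rfl
    omega
  · by_cases hc : fIdx K A (r + 1) ≤ r
    · right
      have ha : rmax (ai A) (fIdx K A (r + 1)) r ≤ rmax (ai A) (fIdx K A (r + 1)) (r + 1) :=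
        rmax_sub (ai A) le_rfl (by omega) hc
      have hb : rmin (ai A) (fIdx K A (r + 1)) (r + 1) ≤ rmin (ai A) (fIdx K A (r + 1)) r :=
        rmin_sub (ai A) le_rfl (by omega) hc
      have hF : Nat.find (p := fun l => r + 1 ≤ l ∨ rmax (ai A) l (r + 1) - rmin (ai A) l (r + 1) ≤ K) ⟨r + 1, Or.inl le_rfl⟩ = fIdx K A (r + 1) := rfl
      rw [hF] at hs
      omega
    · left
      omega

def nai (A : List Int) : Nat → Int := fun i => -(ai A i)

theorem shrink_spec (K : Int) (A : List Int) (hK : 0 ≤ K) {r : Nat} (hr : fIdx K A r ≤ r) :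
    ∀ fuel l, l ≤ fIdx K A r → fIdx K A r - l < fuel →
    pvShrink A K fuel (Q (ai A) l r) (Q (nai A) l r) l =
      some (Q (ai A) (fIdx K A r) r, Q (nai A) (fIdx K A r) r, fIdx K A r) := by
  intro fuel
  induction fuel with
  | zero => intro l h1 h2; omega
  | succ fuel ih =>
    intro l h1 h2
    have hlr : l ≤ r := le_trans h1 hr
    obtain ⟨mnh, mnt, hQmin⟩ : ∃ h t, Q (ai A) l r = h :: t := by
      cases hq : Q (ai A) l r with
      | nil => exact absurd (self_mem_Q (ai A) hlr) (by rw [hq]; simp)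
      | cons x xs => exact ⟨x, xs, rfl⟩
    obtain ⟨mxh, mxt, hQmax⟩ : ∃ h t, Q (nai A) l r = h :: t := by
      cases hq : Q (nai A) l r with
      | nil => exact absurd (self_mem_Q (nai A) hlr) (by rw [hq]; simp)
      | cons x xs => exact ⟨x, xs, rfl⟩
    have hmn := head_Q (ai A) hlr hQmin
    have hmx := head_Q (nai A) hlr hQmax
    have e1 : A.getD mnh 0 = rmin (ai A) l r := hmn.2.2
    have e2 : A.getD mxh 0 = rmax (ai A) l r := by
      have h3 : -(ai A mxh) = rmin (fun i => -(ai A i)) l r := hmx.2.2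
      have h4 := rmax_eq_neg_rmin (ai A) l r
      have h5 : ai A mxh = rmax (ai A) l r := by omega
      exact h5
    rw [hQmin, hQmax]
    simp only [pvShrink, List.head?_cons, List.tail_cons]
    rw [e1, e2]
    by_cases hcase : l = fIdx K A r
    · rw [if_neg (by
        have hvld := vld_of_le K A hK (by omega) hlr
        omega)]
      rw [← hcase, ← hQmin, ← hQmax]
    · have hlt : l < fIdx K A r := by omega
      obtain ⟨hnv, hlr'⟩ := not_vld_of_lt K A hlt
      rw [if_pos (by omega)]
      have hm1 : (if mnh = l then mnt else mnh :: mnt) = Q (ai A) (l + 1) r :=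
        Q_tail (ai A) hlr hQmin
      have hm2 : (if mxh = l then mxt else mxh :: mxt) = Q (nai A) (l + 1) r :=
        Q_tail (nai A) hlr hQmax
      rw [hm1, hm2]
      exact ih (l + 1) (by omega) (by omega)

theorem inner_spec (K : Int) (A : List Int) (hK : 0 ≤ K) (r : Nat) :
    ∀ l, l ≤ r → fIdx K A r ≤ l + 1 → ∀ mx mn t,
    (if ai A l > mx then ai A l else mx) = rmax (ai A) l r →
    (if ai A l < mn then ai A l else mn) = rmin (ai A) l r →
    pvInner K A l mx mn t = t + ((l : Int) + 1 - (fIdx K A r : Int)) := by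
  intro l
  induction l with
  | zero =>
    intro hl0 hf0 mx mn t hmx hmn
    have hf : fIdx K A r = 0 ∨ fIdx K A r = 1 := by omega
    simp only [pvInner, ← ai_apply]
    rcases hf with hf | hf
    · rw [if_pos (by
        have := vld_of_le K A hK (by omega) hl0
        rw [hmx, hmn]
        omega)]
      rw [hf]
      push_cast
      ring
    · rw [if_neg (by
        have := (not_vld_of_lt K A (by omega : (0:Nat) < fIdx K A r)).1
        rw [hmx, hmn]
        omega)]
      rw [hf]
      push_cast
      ring
  | succ l' ih =>
    intro hl hf mx mn t hmx hmn
    by_cases hc : fIdx K A r ≤ l' + 1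
    · -- the window [l'+1..r] is valid: count and recurse
      simp only [pvInner, ← ai_apply]
      rw [if_pos (by
        have := vld_of_le K A hK hc hl
        rw [hmx, hmn]
        omega)]
      have hlt : l' < r := by omega
      have hmx' : (if ai A l' > (if ai A (l' + 1) > mx then ai A (l' + 1) else mx) then ai A l'
          else (if ai A (l' + 1) > mx then ai A (l' + 1) else mx)) = rmax (ai A) l' r := by
        rw [hmx, rmax_of_lt (ai A) hlt]
        rcases le_or_gt (ai A l') (rmax (ai A) (l' + 1) r) with h | h
        · rw [if_neg (by omega), max_eq_right h]
        · rw [if_pos (by omega), max_eq_left (by omega)]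
      have hmn' : (if ai A l' < (if ai A (l' + 1) < mn then ai A (l' + 1) else mn) then ai A l'
          else (if ai A (l' + 1) < mn then ai A (l' + 1) else mn)) = rmin (ai A) l' r := by
        rw [hmn, rmin_of_lt (ai A) hlt]
        rcases le_or_gt (rmin (ai A) (l' + 1) r) (ai A l') with h | h
        · rw [if_neg (by omega), min_eq_right h]
        · rw [if_pos (by omega), min_eq_left (by omega)]
      rw [ih (by omega) (by omega) _ _ (t + 1) hmx' hmn']
      have hcast : (fIdx K A r : Int) ≤ (l' : Int) + 1 := by exact_mod_cast hc
      push_cast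
      ring
    · -- fIdx = l' + 2: the window [l'+1..r] is invalid, break
      have hf2 : fIdx K A r = l' + 2 := by omega
      simp only [pvInner, ← ai_apply]
      rw [if_neg (by
        have := (not_vld_of_lt K A (by omega : l' + 1 < fIdx K A r)).1
        rw [hmx, hmn]
        omega)]
      rw [hf2]
      push_cast
      ring

-- A's capped accumulation, in terms of fIdx
def capA (K : Int) (A : List Int) (res : Int) (r0 : Nat) : Int :=
  if h : r0 < A.length then
    (let res' := res + ((r0 : Int) + 1 - (fIdx K A r0 : Int))
     if res' > 1000000000 then 1000000000 else capA K A res' (r0 + 1))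
  else res
termination_by A.length - r0
decreasing_by omega

def tl (K : Int) (A : List Int) (r0 : Nat) : Int :=
  ((List.range' r0 (A.length - r0)).map (fun r : Nat => (r : Int) + 1 - (fIdx K A r : Int))).sum

theorem tl_nonneg (K : Int) (A : List Int) (r0 : Nat) : 0 ≤ tl K A r0 := by
  unfold tl
  apply List.sum_nonneg
  intro x hx
  obtain ⟨r, _, rfl⟩ := List.mem_map.mp hx
  have h1 := fIdx_le K A r
  have h2 : (fIdx K A r : Int) ≤ (r : Int) := by exact_mod_cast h1
  omega

theorem tl_step (K : Int) (A : List Int) {r0 : Nat} (h : r0 < A.length) :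
    tl K A r0 = ((r0 : Int) + 1 - (fIdx K A r0 : Int)) + tl K A (r0 + 1) := by
  unfold tl
  have h1 : A.length - r0 = (A.length - (r0 + 1)) + 1 := by omega
  rw [h1, List.range'_succ, List.map_cons, List.sum_cons]

theorem outer_spec (K : Int) (A : List Int) (hK : 0 ≤ K) :
    ∀ r0 res, 1 ≤ r0 → r0 ≤ A.length → 0 ≤ res → res ≤ 1000000000 →
    pvOuter K A (List.range' r0 (A.length - r0))
      (Q (ai A) (fIdx K A (r0 - 1)) (r0 - 1)) (Q (nai A) (fIdx K A (r0 - 1)) (r0 - 1))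
      (fIdx K A (r0 - 1)) res = some (capA K A res r0) := by
  have H : ∀ d r0 res, A.length - r0 ≤ d → 1 ≤ r0 → r0 ≤ A.length → 0 ≤ res →
      res ≤ 1000000000 →
      pvOuter K A (List.range' r0 (A.length - r0))
        (Q (ai A) (fIdx K A (r0 - 1)) (r0 - 1)) (Q (nai A) (fIdx K A (r0 - 1)) (r0 - 1))
        (fIdx K A (r0 - 1)) res = some (capA K A res r0) := by
    intro d
    induction d with
    | zero =>
      intro r0 res hd h1 h2 h3 h4
      rw [(by omega : A.length - r0 = 0), List.range'_zero]
      simp only [pvOuter]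
      rw [capA, dif_neg (by omega : ¬ r0 < A.length)]
    | succ d ih =>
      intro r0 res hd h1 h2 h3 h4
      by_cases hlt : r0 < A.length
      · obtain ⟨r1, rfl⟩ : ∃ r1, r0 = r1 + 1 := ⟨r0 - 1, by omega⟩
        simp only [Nat.add_sub_cancel]
        rw [(by omega : A.length - (r1 + 1) = (A.length - (r1 + 1 + 1)) + 1), List.range'_succ]
        simp only [pvOuter]
        have hpush1 : pvPopBack (fun i => decide (A.getD i 0 > A.getD (r1 + 1) 0))
            (Q (ai A) (fIdx K A r1) r1) ++ [r1 + 1] = Q (ai A) (fIdx K A r1) (r1 + 1) := by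
          apply Q_push (ai A) _ (fIdx_le K A r1)
          intro i
          simp only [ai_apply, decide_eq_true_eq, gt_iff_lt]
        have hpush2 : pvPopBack (fun i => decide (A.getD i 0 < A.getD (r1 + 1) 0))
            (Q (nai A) (fIdx K A r1) r1) ++ [r1 + 1] = Q (nai A) (fIdx K A r1) (r1 + 1) := by
          apply Q_push (nai A) _ (fIdx_le K A r1)
          intro i
          simp only [nai, ai_apply, decide_eq_true_eq]
          omega
        rw [hpush1, hpush2]
        have hfle := fIdx_le K A (r1 + 1)
        have hshr := shrink_spec K A hK hfle (A.length + 2) (fIdx K A r1)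
          (fIdx_mono K A r1) (by omega)
        rw [hshr]
        dsimp only
        have hfleZ : (fIdx K A (r1 + 1) : Int) ≤ ((r1 + 1 : Nat) : Int) := by
          exact_mod_cast hfle
        rw [show ((r1 + 1 : Nat) : Int) - (fIdx K A (r1 + 1) : Int) + 1 =
          ((r1 + 1 : Nat) : Int) + 1 - (fIdx K A (r1 + 1) : Int) from by ring]
        by_cases hbig : res + (((r1 + 1 : Nat) : Int) + 1 - (fIdx K A (r1 + 1) : Int)) > 1000000000
        · rw [if_pos hbig]
          rw [capA]
          simp only [dif_pos hlt]
          rw [if_pos hbig]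
        · rw [if_neg hbig]
          have hout := ih (r1 + 1 + 1) (res + (((r1 + 1 : Nat) : Int) + 1 - (fIdx K A (r1 + 1) : Int)))
            (by omega) (by omega) (by omega) (by omega) (by omega)
          simp only [Nat.add_sub_cancel] at hout
          rw [hout]
          conv_rhs => rw [capA]
          simp only [dif_pos hlt]
          rw [if_neg hbig]
      · rw [(by omega : A.length - r0 = 0), List.range'_zero]
        simp only [pvOuter]
        rw [capA, dif_neg hlt]
  exact fun r0 res h1 h2 h3 h4 => H (A.length - r0) r0 res le_rfl h1 h2 h3 h4

theorem capA_eq_min (K : Int) (A : List Int) (_hK : 0 ≤ K) :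
    ∀ r0 res, r0 ≤ A.length → 0 ≤ res → res ≤ 1000000000 →
    capA K A res r0 = min (res + tl K A r0) 1000000000 := by
  have H : ∀ d r0 res, A.length - r0 ≤ d → r0 ≤ A.length → 0 ≤ res →
      res ≤ 1000000000 → capA K A res r0 = min (res + tl K A r0) 1000000000 := by
    intro d
    induction d with
    | zero =>
      intro r0 res hd h1 h2 h3
      rw [capA, dif_neg (by omega : ¬ r0 < A.length)]
      unfold tl
      rw [(by omega : A.length - r0 = 0)]
      simp only [List.range'_zero, List.map_nil, List.sum_nil, add_zero]
      exact (min_eq_left h3).symm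
    | succ d ih =>
      intro r0 res hd h1 h2 h3
      by_cases hlt : r0 < A.length
      · rw [capA]
        simp only [dif_pos hlt]
        have hfle : (fIdx K A r0 : Int) ≤ (r0 : Int) := by
          exact_mod_cast fIdx_le K A r0
        have htl := tl_nonneg K A (r0 + 1)
        rw [tl_step K A hlt]
        by_cases hbig : res + ((r0 : Int) + 1 - (fIdx K A r0 : Int)) > 1000000000
        · rw [if_pos hbig]
          rw [min_eq_right (by omega : (1000000000:Int) ≤ res + (((r0 : Int) + 1 - (fIdx K A r0 : Int)) + tl K A (r0 + 1)))]
        · rw [if_neg hbig,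
            ih (r0 + 1) (res + ((r0 : Int) + 1 - (fIdx K A r0 : Int))) (by omega) (by omega)
              (by omega) (by omega)]
          rw [add_assoc]
      · rw [capA, dif_neg hlt]
        unfold tl
        rw [(by omega : A.length - r0 = 0)]
        simp only [List.range'_zero, List.map_nil, List.sum_nil, add_zero]
        exact (min_eq_left h3).symm
  exact fun r0 res h1 h2 h3 => H (A.length - r0) r0 res le_rfl h1 h2 h3

theorem foldB (K : Int) (A : List Int) (hK : 0 ≤ K) :
    ∀ (L : List Nat) (t : Int),
    L.foldl (fun t r => pvInner K A r (A.getD r 0) (A.getD r 0) t) t =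
      t + (L.map (fun r : Nat => (r : Int) + 1 - (fIdx K A r : Int))).sum := by
  intro L
  induction L with
  | nil => intro t; simp
  | cons r L ih =>
    intro t
    have hmx : (if ai A r > A.getD r 0 then ai A r else A.getD r 0) = rmax (ai A) r r := by
      rw [rmax_self]
      simp only [ai_apply]
      rw [if_neg (by omega)]
    have hmn : (if ai A r < A.getD r 0 then ai A r else A.getD r 0) = rmin (ai A) r r := by
      rw [rmin_self]
      simp only [ai_apply]
      rw [if_neg (by omega)]
    have hstep := inner_spec K A hK r r le_rfl
      (by have := fIdx_le K A r; omega) (A.getD r 0) (A.getD r 0) t hmx hmn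
    rw [List.foldl_cons, hstep, ih, List.map_cons, List.sum_cons]
    ring

-- ===== VERDICT (by name: the statement is the Claim_ definition above) =====
theorem solution_spec : Claim_equal_solution := by
  unfold Claim_equal_solution
  intro K A _ hpre
  unfold Spec_solution
  by_cases hA : A = []
  · subst hA
    norm_num [solution, solution_alt, pvOuter]
  · have hK : 0 ≤ K := by
      rcases hpre with h | h
      · exact h
      · exact absurd h hA
    have hn : 1 ≤ A.length := List.length_pos_iff.mpr hA
    have hB : solution_alt K A = min (tl K A 0) 1000000000 := by
      unfold solution_alt
      rw [List.range_eq_range', foldB K A hK, zero_add]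
      unfold tl
      rw [Nat.sub_zero]
    have hf0 : fIdx K A 0 = 0 := Nat.le_zero.mp (fIdx_le K A 0)
    have hQ0min : Q (ai A) 0 0 = [0] := by
      rw [Q, (by omega : 0 + 1 - 0 = 1), List.range'_one]
      simp [pb]
    have hQ0max : Q (nai A) 0 0 = [0] := by
      rw [Q, (by omega : 0 + 1 - 0 = 1), List.range'_one]
      simp [pb]
    have hA1 : solution K A = capA K A 0 0 := by
      unfold solution
      rw [List.range_eq_range', (by omega : A.length = (A.length - 1) + 1), List.range'_succ]
      simp only [pvOuter, pvPopBack, pvPopBackRev, List.reverse_nil, List.nil_append]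
      have hshr := shrink_spec K A hK (fIdx_le K A 0) (A.length + 2) 0 (by omega) (by omega)
      rw [hf0] at hshr
      rw [hQ0min, hQ0max] at hshr
      rw [hshr]
      dsimp only
      rw [if_neg (by norm_num)]
      norm_num
      have hout := outer_spec K A hK 1 1 (by omega) (by omega) (by norm_num) (by norm_num)
      simp only [Nat.sub_self] at hout
      rw [hf0, hQ0min, hQ0max] at hout
      rw [hout, Option.getD_some]
      conv_rhs => rw [capA]
      simp only [dif_pos (by omega : 0 < A.length), hf0]
      rw [if_neg (by norm_num)]
      norm_num
    rw [hA1, capA_eq_min K A hK 0 0 (by omega) le_rfl (by norm_num), zero_add, hB]
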